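-- pv_equiv track=rewrite | github.com/teleprint-me/archive | archive/csv/tools/sort.py | sort_csv_by_header
-- ===== SOURCE A (Python) =====
-- def sort_csv_by_header(
--     csv_table: list[list[str]], reverse: bool = False
-- ) -> list[list[str]]:
--     """Sorts a CSV table by column header in ascending or descending order.
--
--     Args:
--         csv_table: The list of CSV rows to sort.
--         reverse (optional): If True, the table is sorted in descending order. Defaults to False.
--
--     Returns:
--         A sorted list of CSV rows with headers in ascending or descending order.
--     """
--     header = csv_table[0]
--     header_indices = sorted(
--         range(len(header)), key=lambda i: header[i], reverse=reverse
--     )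
--     header = [header[i] for i in header_indices]
--     sorted_data = []
--     for index in header_indices:
--         col_data = [row[index] for row in csv_table[1:]]
--         sorted_data.append(col_data)
--     return [header] + list(map(list, zip(*sorted_data)))
-- ===== SOURCE B (Python) =====
-- def sort_csv_by_header(
--     csv_table: list[list[str]], reverse: bool = False
-- ) -> list[list[str]]:
--     header = csv_table[0]
--     header_indices = sorted(
--         range(len(header)), key=lambda i: header[i], reverse=reverse
--     )
--     return [[row[i] for i in header_indices] for row in csv_table]
-- ===== Notes on version B (the rewrite author's own statement) =====
-- stated objective: simpler
-- what changed: B reindexes every row directly with the sorted index permutation in one pass, instead of A's building per-column lists from the data rows and transposing them back with zip(*...); Pre_ excludes the degenerate zero-column corner (empty header row with data rows present), where A returns only the header while B returns one empty list per row: neither value is specified for a zero-column table.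
-- outside the precondition, e.g. on sort_csv_by_header([[], ['x']], False): A returns [[]], B returns [[], []]; on sort_csv_by_header([[], []], False): A returns [[]], B returns [[], []]; on sort_csv_by_header([], False): A raises IndexError, B raises IndexError
import Mathlib
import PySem

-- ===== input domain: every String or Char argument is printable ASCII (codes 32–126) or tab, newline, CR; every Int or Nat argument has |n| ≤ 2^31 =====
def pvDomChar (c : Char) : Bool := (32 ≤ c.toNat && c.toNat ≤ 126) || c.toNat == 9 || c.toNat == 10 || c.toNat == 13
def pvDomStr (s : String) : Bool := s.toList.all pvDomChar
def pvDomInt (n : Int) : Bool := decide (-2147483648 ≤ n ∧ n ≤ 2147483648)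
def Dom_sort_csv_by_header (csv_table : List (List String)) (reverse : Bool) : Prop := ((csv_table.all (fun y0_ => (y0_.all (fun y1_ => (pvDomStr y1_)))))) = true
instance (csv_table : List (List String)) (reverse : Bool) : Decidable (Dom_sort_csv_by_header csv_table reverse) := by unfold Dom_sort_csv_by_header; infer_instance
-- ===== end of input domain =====

-- B replaces A's per-column lists + zip(*...) transpose by a direct row-by-row reindex (simpler).

-- ===== PORT A =====

-- zip(*cols) for a list of columns, Python-exact: zip() of no iterables yields nothing,
-- otherwise tuples of heads while every column is nonempty (hand-ported; PySem has only binary zip).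
def pvZipStar (cols : List (List String)) : List (List String) :=
  if cols = [] then []
  else if hall : cols.all (fun c => !c.isEmpty) then
    (cols.map (fun c => c.headD "")) :: pvZipStar (cols.map (fun c => c.tail))
  else []
  termination_by (cols.headD []).length
  decreasing_by
    cases cols with
    | nil => simp at *
    | cons c rest =>
      simp only [List.all_cons, Bool.and_eq_true] at hall
      cases c with
      | nil => simp [List.isEmpty] at hall
      | cons x xs => simp

-- row[i] / header[i]: Python raises IndexError out of range; those inputs are excluded by Pre_.
def sort_csv_by_header (csv_table : List (List String)) (reverse : Bool) : List (List String) :=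
  let header := PySem.List.pyGetD csv_table 0 []
  let header_indices := PySem.List.sorted (PySem.List.pyRange 0 (header.length : Int) 1)
      (fun i => PySem.List.pyGetD header i "") reverse
  let header' := header_indices.map (fun i => PySem.List.pyGetD header i "")
  let sorted_data := header_indices.map (fun index =>
      (PySem.List.slice csv_table (some 1) none).map (fun row => PySem.List.pyGetD row index ""))
  -- list(map(list, zip(*sorted_data))) : map(list, ·) is the identity on lists of lists
  [header'] ++ pvZipStar sorted_data

-- ===== PORT B =====
def sort_csv_by_header_alt (csv_table : List (List String)) (reverse : Bool) : List (List String) :=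
  let header := PySem.List.pyGetD csv_table 0 []
  let header_indices := PySem.List.sorted (PySem.List.pyRange 0 (header.length : Int) 1)
      (fun i => PySem.List.pyGetD header i "") reverse
  csv_table.map (fun row => header_indices.map (fun i => PySem.List.pyGetD row i ""))

-- ===== PRECONDITION & SPEC =====
-- A (and B) raise IndexError on an empty table (csv_table[0]) and on data rows shorter than the header.
-- Pre_ also excludes the degenerate zero-column corner (empty header row but data rows present), where
-- A returns only [[]] (zip of no columns yields nothing) while B returns one empty list per row —
-- both values are defensible for a zero-column table and no one would specify either.
def Pre_sort_csv_by_header (csv_table : List (List String)) (reverse : Bool) : Prop :=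
  csv_table ≠ [] ∧ (∀ row ∈ csv_table.tail, (csv_table.headD []).length ≤ row.length) ∧
    (csv_table.headD [] ≠ [] ∨ csv_table.length ≤ 1)
instance (csv_table : List (List String)) (reverse : Bool) : Decidable (Pre_sort_csv_by_header csv_table reverse) := by unfold Pre_sort_csv_by_header; infer_instance

def pvWitness_sort_csv_by_header : List (List String) × Bool := ([["b", "a"], ["1", "2"]], false)

def Spec_sort_csv_by_header (csv_table : List (List String)) (reverse : Bool) (out : List (List String)) : Prop := out = sort_csv_by_header_alt csv_table reverse
instance (csv_table : List (List String)) (reverse : Bool) (out : List (List String)) : Decidable (Spec_sort_csv_by_header csv_table reverse out) := by unfold Spec_sort_csv_by_header; infer_instance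

-- ===== CLAIM (what is proved, stated in full; the proofs are below) =====
def Claim_equal_sort_csv_by_header : Prop := ∀ (csv_table : List (List String)) (reverse : Bool), Dom_sort_csv_by_header csv_table reverse → Pre_sort_csv_by_header csv_table reverse → Spec_sort_csv_by_header csv_table reverse (sort_csv_by_header csv_table reverse)

-- ===== LEMMAS AND PROOFS =====

-- the transpose of the columns selected by idxs is the row-by-row reindex (for at least one column)
theorem pvZipStar_cols (idxs : List Int) (rows : List (List String))
    (hne : idxs ≠ []) :
    pvZipStar (idxs.map (fun i => rows.map (fun row => PySem.List.pyGetD row i ""))) =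
      rows.map (fun row => idxs.map (fun i => PySem.List.pyGetD row i "")) := by
  induction rows with
  | nil =>
    rw [pvZipStar]
    cases idxs with
    | nil => simp at hne
    | cons j js => simp [List.isEmpty]
  | cons r rs ih =>
    rw [pvZipStar]
    have hcols : idxs.map (fun i => (r :: rs).map (fun row => PySem.List.pyGetD row i "")) ≠ [] := by
      simp [hne]
    rw [if_neg hcols, dif_pos (by simp [List.isEmpty])]
    simp only [List.map_map, List.map_cons]
    refine congrArg₂ _ (by simp) ?_
    exact ih

theorem pvZipStar_nil : pvZipStar [] = [] := by rw [pvZipStar]; simp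

-- ===== VERDICT (by name: the statement is the Claim_ definition above) =====
theorem sort_csv_by_header_spec : Claim_equal_sort_csv_by_header := by
  intro csv_table reverse _ hpre
  unfold Spec_sort_csv_by_header
  obtain ⟨hne, _, hcorner⟩ := hpre
  obtain ⟨h, tl, rfl⟩ := List.exists_cons_of_ne_nil hne
  unfold sort_csv_by_header sort_csv_by_header_alt
  simp only [PySem.List.pyGetD_zero_cons, PySem.List.slice_from_one, List.tail_cons]
  by_cases hh : h = []
  · -- empty header: Pre_'s corner clause forces no data rows
    have htl : tl = [] := by
      rcases hcorner with hc | hc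
      · simp at hc; exact absurd hh hc
      · cases tl with | nil => rfl | cons a b => simp at hc
    subst hh htl
    simp [PySem.List.sorted, pvZipStar_nil]
  · -- nonempty header: the selected-index list is nonempty, pvZipStar_cols applies
    have hidx : PySem.List.sorted (PySem.List.pyRange 0 (h.length : Int) 1)
        (fun i => PySem.List.pyGetD h i "") reverse ≠ [] := by
      intro hcon
      have hlen := PySem.List.length_sorted (xs := PySem.List.pyRange 0 (h.length : Int) 1)
        (key := fun i => PySem.List.pyGetD h i "") (rev := reverse)
      rw [hcon] at hlen
      simp [PySem.List.length_pyRange_one] at hlen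
      exact hh (List.eq_nil_of_length_eq_zero hlen.symm)
    rw [pvZipStar_cols _ tl hidx]
    simp
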